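-- pv_equiv track=rewrite | github.com/Abdul-fattah-Tayih/leetcode-submissions | maximum_points_you_can_obtain_from_cards.py | max_score_naive
-- ===== SOURCE A (Python) =====
-- from typing import List
--
-- def max_score_naive(card_points: List[int], k: int) -> int:
--     """
--         Brute force solution, calculates every possible sum, but fails on leetcode because of timeout in large inputs
--         Time complexity: O(k^2)
--         Space complexity: O(1)
--     """
--     max_sum = 0
--     current_sum = 0
--     cards_last_index = len(card_points) - 1
--     for idx in range(cards_last_index, cards_last_index - k, -1):
--         current_sum += card_points[idx]
--         max_sum = max(max_sum, current_sum)
--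
--     current_sum = 0
--     for idx in range(k):
--         current_sum += card_points[idx]
--         max_sum = max(max_sum, current_sum)
--
--     for idx in range(k):
--         current_sum = sum(card_points[:idx]) if idx > 0 else 0
--         current_sum += card_points[idx]
--         for right in range(cards_last_index, cards_last_index - k + idx + 1, -1):
--             current_sum += card_points[right]
--
--         max_sum = max(max_sum, current_sum)
--
--     return max_sum
-- ===== SOURCE B (Python) =====
-- from typing import List
--
-- def max_score_naive(card_points: List[int], k: int) -> int:
--     """
--         O(k) re-implementation via prefix/suffix running sums:
--         prefix[i] = sum of first i cards, suffix[j] = sum of last j cards (0..k);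
--         the answer is the max of 0, all one-sided partial sums, and prefix[i]+suffix[k-i].
--     """
--     n = len(card_points)
--     prefix = [0]
--     for i in range(k):
--         prefix.append(prefix[-1] + card_points[i])
--     suffix = [0]
--     for j in range(k):
--         suffix.append(suffix[-1] + card_points[n - 1 - j])
--     best = 0
--     for s in prefix[1:]:
--         best = max(best, s)
--     for s in suffix[1:]:
--         best = max(best, s)
--     for i in range(1, k + 1):
--         best = max(best, prefix[i] + suffix[k - i])
--     return best
-- ===== Notes on version B (the rewrite author's own statement) =====
-- stated objective: faster
-- what changed: Replaces A's quadratic third loop (which re-sums a prefix slice and a suffix range for every split) by O(k) prefix/suffix running-sum arrays built once, then a single linear pass over the k+1 splits and the one-sided partial maxima.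
import Mathlib
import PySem

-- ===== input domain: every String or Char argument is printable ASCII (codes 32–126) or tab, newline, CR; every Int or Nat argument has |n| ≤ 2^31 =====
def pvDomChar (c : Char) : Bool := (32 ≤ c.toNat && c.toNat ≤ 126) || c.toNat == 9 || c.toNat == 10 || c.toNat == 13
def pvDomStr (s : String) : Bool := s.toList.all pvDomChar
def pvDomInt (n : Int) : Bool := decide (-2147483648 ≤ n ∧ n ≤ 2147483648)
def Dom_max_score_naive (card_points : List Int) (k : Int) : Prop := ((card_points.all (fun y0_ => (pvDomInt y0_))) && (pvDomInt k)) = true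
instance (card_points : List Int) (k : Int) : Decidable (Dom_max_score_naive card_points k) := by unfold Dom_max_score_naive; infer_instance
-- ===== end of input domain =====

-- B replaces A's quadratic re-summation of every left/right split by prefix/suffix
-- running-sum arrays built once and one linear pass (objective: faster).

-- ===== PORT A =====
def max_score_naive (card_points : List Int) (k : Int) : Int :=
  let cards_last_index : Int := (card_points.length : Int) - 1
  let s1 := (PySem.List.pyRange cards_last_index (cards_last_index - k) (-1)).foldl
      (fun (st : Int × Int) idx =>
        let c := st.2 + PySem.List.pyGetD card_points idx 0
        (max st.1 c, c)) (0, 0)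
  let s2 := (PySem.List.pyRange 0 k 1).foldl
      (fun (st : Int × Int) idx =>
        let c := st.2 + PySem.List.pyGetD card_points idx 0
        (max st.1 c, c)) (s1.1, 0)
  (PySem.List.pyRange 0 k 1).foldl
      (fun (m : Int) idx =>
        let c0 : Int := if 0 < idx then (PySem.List.slice card_points none (some idx)).sum else 0
        let c1 := c0 + PySem.List.pyGetD card_points idx 0
        let c2 := (PySem.List.pyRange cards_last_index (cards_last_index - k + idx + 1) (-1)).foldl
            (fun c r => c + PySem.List.pyGetD card_points r 0) c1
        max m c2) s2.1

-- ===== PORT B =====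
def max_score_naive_alt (card_points : List Int) (k : Int) : Int :=
  let n : Int := (card_points.length : Int)
  let prefixSums := (PySem.List.pyRange 0 k 1).foldl
      (fun (l : List Int) i =>
        l ++ [PySem.List.pyGetD l (-1) 0 + PySem.List.pyGetD card_points i 0]) [0]
  let suffixSums := (PySem.List.pyRange 0 k 1).foldl
      (fun (l : List Int) j =>
        l ++ [PySem.List.pyGetD l (-1) 0 + PySem.List.pyGetD card_points (n - 1 - j) 0]) [0]
  let b1 := (PySem.List.slice prefixSums (some 1) none).foldl (fun best s => max best s) 0
  let b2 := (PySem.List.slice suffixSums (some 1) none).foldl (fun best s => max best s) b1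
  (PySem.List.pyRange 1 (k + 1) 1).foldl
      (fun best i =>
        max best (PySem.List.pyGetD prefixSums i 0 + PySem.List.pyGetD suffixSums (k - i) 0)) b2

-- ===== PRECONDITION & SPEC =====
-- A raises IndexError exactly when k > len(card_points); B raises there too.
def Pre_max_score_naive (card_points : List Int) (k : Int) : Prop :=
  k ≤ (card_points.length : Int)
instance (card_points : List Int) (k : Int) : Decidable (Pre_max_score_naive card_points k) := by
  unfold Pre_max_score_naive; infer_instance
def pvWitness_max_score_naive : List Int × Int := ([1, 2, 3, 1], 3)

def Spec_max_score_naive (card_points : List Int) (k : Int) (out : Int) : Prop := out = max_score_naive_alt card_points k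
instance (card_points : List Int) (k : Int) (out : Int) : Decidable (Spec_max_score_naive card_points k out) := by unfold Spec_max_score_naive; infer_instance

-- ===== CLAIM (what is proved, stated in full; the proofs are below) =====
def Claim_equal_max_score_naive : Prop := ∀ (card_points : List Int) (k : Int), Dom_max_score_naive card_points k → Pre_max_score_naive card_points k → Spec_max_score_naive card_points k (max_score_naive card_points k)

-- ===== LEMMAS AND PROOFS =====

/-- Running partial sums of `l` starting from `c` (without the leading `c`). -/
def runsums (c : Int) : List Int → List Int
  | [] => []
  | x :: t => (c + x) :: runsums (c + x) t

/-- Loops 1/2 of A: running-max/running-sum state over the elements. -/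
theorem maxscan (l : List Int) (m c : Int) :
    l.foldl (fun (st : Int × Int) x => (max st.1 (st.2 + x), st.2 + x)) (m, c)
      = ((runsums c l).foldl max m, c + l.sum) := by
  induction l generalizing m c with
  | nil => simp [runsums]
  | cons x t ih => simp [runsums, ih, add_assoc]

/-- B's array-building loop appends the running sum. -/
theorem buildscan (l : List Int) (acc : List Int) (c : Int) :
    l.foldl (fun (ps : List Int) x => ps ++ [PySem.List.pyGetD ps (-1) 0 + x]) (acc ++ [c])
      = (acc ++ [c]) ++ runsums c l := by
  induction l generalizing acc c with
  | nil => simp [runsums]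
  | cons x t ih =>
    simp only [List.foldl_cons, PySem.List.pyGetD_neg_one_append_singleton, runsums]
    have := ih (acc := acc ++ [c]) (c := c + x)
    simp only [List.append_assoc, List.singleton_append] at this ⊢
    exact this

/-- Index-fold over range(kn) with cp[i] is an element fold over the first kn elements. -/
theorem range_fold_take {α : Type} (cp : List Int) (kn : Nat) (h : kn ≤ cp.length)
    (f : α → Int → α) (d : Int) (init : α) :
    (PySem.List.pyRange 0 (kn : Int) 1).foldl (fun acc i => f acc (PySem.List.pyGetD cp i d)) init
      = (cp.take kn).foldl f init := by
  have hl : ((cp.take kn).length : Int) = (kn : Int) := by simp [List.length_take, h]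
  rw [← PySem.List.foldl_pyRange_zero_pyGetD' (cp.take kn) d f init, hl]
  apply PySem.List.foldl_congr_mem
  intro acc i hi
  rw [PySem.List.mem_pyRange_one] at hi
  have h0 : 0 ≤ i := hi.1
  have h1 : i.toNat < kn := by omega
  rw [PySem.List.pyGetD_eq_getElem cp d h0 (by omega),
      PySem.List.pyGetD_eq_getElem (cp.take kn) d h0 (by rw [hl]; omega)]
  simp [List.getElem_take]

/-- Index-fold over range(kn) with cp[n-1-j] is an element fold over the reversed last kn elements. -/
theorem range_fold_rev {α : Type} (cp : List Int) (kn : Nat) (h : kn ≤ cp.length)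
    (f : α → Int → α) (d : Int) (init : α) :
    (PySem.List.pyRange 0 (kn : Int) 1).foldl
        (fun acc j => f acc (PySem.List.pyGetD cp ((cp.length : Int) - 1 - j) d)) init
      = ((cp.drop (cp.length - kn)).reverse).foldl f init := by
  have hmap : (PySem.List.pyRange 0 (kn : Int) 1).map
      (fun j => PySem.List.pyGetD cp ((cp.length : Int) - 1 - j) d)
      = (cp.drop (cp.length - kn)).reverse := by
    apply List.ext_getElem
    · simp [PySem.List.length_pyRange_one]; omega
    · intro j hj1 hj2
      have hjk : j < kn := by
        simpa [PySem.List.length_pyRange_one] using hj1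
      rw [List.getElem_map, PySem.List.getElem_pyRange_one]
      have hz : (0 : Int) + j = (j : Int) := by omega
      rw [hz]
      rw [PySem.List.pyGetD_eq_getElem cp d (by omega) (by omega)]
      rw [List.getElem_reverse, List.getElem_drop]
      congr 1
      simp only [List.length_drop]
      omega
  rw [← hmap, List.foldl_map]

/-- A's inner countdown loop sums cp[a:], added to the accumulator. -/
theorem countdown_sum (cp : List Int) (a : Int) (h0 : 0 ≤ a) (init : Int) :
    (PySem.List.pyRange ((cp.length : Int) - 1) (a - 1) (-1)).foldl
        (fun c r => c + PySem.List.pyGetD cp r 0) init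
      = init + (cp.drop a.toNat).sum := by
  have h1 : PySem.List.pyRange ((cp.length : Int) - 1) (a - 1) (-1)
      = (PySem.List.pyRange a (cp.length : Int) 1).reverse := by
    rw [PySem.List.pyRange_neg_one_eq_reverse]
    have e1 : a - 1 + 1 = a := by ring
    have e2 : (cp.length : Int) - 1 + 1 = (cp.length : Int) := by ring
    rw [e1, e2]
  rw [h1, PySem.List.foldl_add (g := fun r => PySem.List.pyGetD cp r 0), List.map_reverse,
      List.sum_reverse, PySem.List.map_pyGetD_pyRange' cp 0 h0]

theorem getD_cons_runsums (l : List Int) (j : Nat) (c : Int) (h : j ≤ l.length) :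
    (c :: runsums c l).getD j 0 = c + (l.take j).sum := by
  induction l generalizing j c with
  | nil =>
    have : j = 0 := Nat.le_zero.mp h
    subst this; simp [runsums]
  | cons x t ih =>
    cases j with
    | zero => simp
    | succ j =>
      simp only [runsums, List.getD_cons_succ, List.take_succ_cons, List.sum_cons]
      rw [ih _ _ (by simpa using h)]
      ring

theorem foldl_max_pull (l : List Int) (a x : Int) :
    l.foldl max (max a x) = max (l.foldl max a) x := by
  induction l generalizing a with
  | nil => rfl
  | cons y t ih =>
    simp only [List.foldl_cons]
    rw [show max (max a x) y = max (max a y) x by rw [max_right_comm], ih]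

theorem foldl_max_comm (l1 l2 : List Int) (a : Int) :
    l2.foldl max (l1.foldl max a) = l1.foldl max (l2.foldl max a) := by
  induction l1 generalizing a with
  | nil => rfl
  | cons x t ih =>
    simp only [List.foldl_cons]
    rw [ih, foldl_max_pull]

theorem sum_take_reverse (l : List Int) (m : Nat) :
    (l.reverse.take m).sum = (l.drop (l.length - m)).sum := by
  rw [List.take_reverse]
  exact List.sum_reverse _

/-- Both programs at k ≤ 0 return 0. -/
theorem equal_nonpos (cp : List Int) (k : Int) (hk : k ≤ 0) :
    max_score_naive cp k = max_score_naive_alt cp k := by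
  simp [max_score_naive, max_score_naive_alt,
        PySem.List.pyRange_neg_one_eq_nil
          (show (cp.length : Int) - 1 ≤ (cp.length : Int) - 1 - k by omega),
        PySem.List.pyRange_one_eq_nil (show k ≤ 0 from hk),
        PySem.List.pyRange_one_eq_nil (show k + 1 ≤ 1 by omega),
        PySem.List.slice_from_one]

/-- The main case: 0 ≤ k = kn ≤ len(cp). -/
theorem equal_pos (cp : List Int) (kn : Nat) (h : kn ≤ cp.length) :
    max_score_naive cp (kn : Int) = max_score_naive_alt cp (kn : Int) := by
  have hFlen : (cp.take kn).length = kn := by simp [h]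
  have hBlen : ((cp.drop (cp.length - kn)).reverse).length = kn := by simp; omega
  -- loop 1 of A equals the running-max scan over the reversed last kn elements
  have hA1 : (PySem.List.pyRange ((cp.length : Int) - 1) ((cp.length : Int) - 1 - (kn : Int)) (-1)).foldl
      (fun (st : Int × Int) idx =>
        (max st.1 (st.2 + PySem.List.pyGetD cp idx 0), st.2 + PySem.List.pyGetD cp idx 0)) (0, 0)
      = ((runsums 0 ((cp.drop (cp.length - kn)).reverse)).foldl max 0,
          0 + ((cp.drop (cp.length - kn)).reverse).sum) := by
    have hrange : PySem.List.pyRange ((cp.length : Int) - 1) ((cp.length : Int) - 1 - (kn : Int)) (-1)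
        = (PySem.List.pyRange ((cp.length : Int) - (kn : Int)) (cp.length : Int) 1).reverse := by
      rw [PySem.List.pyRange_neg_one_eq_reverse]
      have e1 : (cp.length : Int) - 1 - (kn : Int) + 1 = (cp.length : Int) - (kn : Int) := by ring
      have e2 : (cp.length : Int) - 1 + 1 = (cp.length : Int) := by ring
      rw [e1, e2]
    have hmapdrop : (PySem.List.pyRange ((cp.length : Int) - (kn : Int)) (cp.length : Int) 1).map
        (fun j => PySem.List.pyGetD cp j 0) = cp.drop (cp.length - kn) := by
      rw [PySem.List.map_pyGetD_pyRange' cp 0 (by omega)]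
      congr 1
      omega
    have hfm : ∀ (l : List Int) (init : Int × Int),
        l.foldl (fun (st : Int × Int) idx =>
          (max st.1 (st.2 + PySem.List.pyGetD cp idx 0), st.2 + PySem.List.pyGetD cp idx 0)) init
          = (l.map (fun j => PySem.List.pyGetD cp j 0)).foldl
              (fun (st : Int × Int) x => (max st.1 (st.2 + x), st.2 + x)) init := by
      intro l init
      rw [List.foldl_map]
    rw [hrange, hfm, List.map_reverse, hmapdrop, maxscan]
  -- loop 2 of A from (m1, 0)
  have hA2 : ∀ m1 : Int, (PySem.List.pyRange 0 (kn : Int) 1).foldl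
      (fun (st : Int × Int) idx =>
        (max st.1 (st.2 + PySem.List.pyGetD cp idx 0), st.2 + PySem.List.pyGetD cp idx 0)) (m1, 0)
      = ((runsums 0 (cp.take kn)).foldl max m1, 0 + (cp.take kn).sum) := by
    intro m1
    rw [range_fold_take cp kn h
          (fun (st : Int × Int) x => (max st.1 (st.2 + x), st.2 + x)) 0 (m1, 0), maxscan]
  -- B's prefix array
  have hB1 : (PySem.List.pyRange 0 (kn : Int) 1).foldl
      (fun (l : List Int) i =>
        l ++ [PySem.List.pyGetD l (-1) 0 + PySem.List.pyGetD cp i 0]) [0]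
      = 0 :: runsums 0 (cp.take kn) := by
    rw [range_fold_take cp kn h
          (fun (l : List Int) v => l ++ [PySem.List.pyGetD l (-1) 0 + v]) 0 [0]]
    have := buildscan (cp.take kn) [] 0
    simpa using this
  -- B's suffix array
  have hB2 : (PySem.List.pyRange 0 (kn : Int) 1).foldl
      (fun (l : List Int) j =>
        l ++ [PySem.List.pyGetD l (-1) 0 + PySem.List.pyGetD cp ((cp.length : Int) - 1 - j) 0]) [0]
      = 0 :: runsums 0 ((cp.drop (cp.length - kn)).reverse) := by
    rw [range_fold_rev cp kn h
          (fun (l : List Int) v => l ++ [PySem.List.pyGetD l (-1) 0 + v]) 0 [0]]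
    have := buildscan ((cp.drop (cp.length - kn)).reverse) [] 0
    simpa using this
  simp only [max_score_naive, max_score_naive_alt]
  rw [hA1, hA2, hB1, hB2]
  simp only [PySem.List.slice_from_one, List.tail_cons]
  -- the two starting maxima agree (one-sided partial sums, opposite order)
  have hinit : (runsums 0 ((cp.drop (cp.length - kn)).reverse)).foldl max
        ((runsums 0 (cp.take kn)).foldl max 0)
      = (runsums 0 (cp.take kn)).foldl max
        ((runsums 0 ((cp.drop (cp.length - kn)).reverse)).foldl max 0) :=
    foldl_max_comm _ _ 0
  rw [← hinit]
  -- both final loops are the same fold over range kn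
  rw [PySem.List.pyRange_one 0 (kn : Int), PySem.List.pyRange_one 1 ((kn : Int) + 1),
      show ((kn : Int) - 0).toNat = kn by omega,
      show ((kn : Int) + 1 - 1).toNat = kn by omega,
      List.foldl_map, List.foldl_map]
  apply PySem.List.foldl_congr_mem
  intro m t ht
  have htk : t < kn := List.mem_range.mp ht
  congr 1
  -- A's term at split t
  have e0 : (0 : Int) + (t : Nat) = ((t : Nat) : Int) := by ring
  rw [e0]
  have hc0 : (if 0 < ((t : Nat) : Int)
        then (PySem.List.slice cp none (some ((t : Nat) : Int))).sum else 0)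
      = (cp.take t).sum := by
    rcases Nat.eq_zero_or_pos t with h0 | h0
    · subst h0; simp
    · rw [if_pos (by exact_mod_cast h0), PySem.List.slice_to cp (by omega)]
      simp
  rw [hc0, PySem.List.pyGetD_eq_getElem cp 0 (by omega) (by omega)]
  have hc1 : (cp.take t).sum + cp[((t : Nat) : Int).toNat] = (cp.take (t + 1)).sum := by
    rw [List.sum_take_succ _ _ (show t < cp.length by omega)]
    simp
  rw [hc1]
  have estop : (cp.length : Int) - 1 - (kn : Int) + (t : Nat) + 1
      = ((cp.length : Int) - (kn : Int) + (t : Nat) + 1) - 1 := by ring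
  rw [estop, countdown_sum cp _ (by omega),
      show ((cp.length : Int) - (kn : Int) + (t : Nat) + 1).toNat
          = cp.length - kn + t + 1 by omega]
  -- B's term at split t
  have ei : (1 : Int) + (t : Nat) = (((t + 1 : Nat)) : Int) := by push_cast; ring
  have ej : (kn : Int) - (((t + 1 : Nat)) : Int) = (((kn - 1 - t : Nat)) : Int) := by
    push_cast; omega
  rw [ei, ej, PySem.List.pyGetD_natCast, PySem.List.pyGetD_natCast,
      getD_cons_runsums _ _ _ (by rw [hFlen]; omega),
      getD_cons_runsums _ _ _ (by rw [hBlen]; omega),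
      sum_take_reverse]
  rw [List.take_take, show min (t + 1) kn = t + 1 by omega, List.drop_drop]
  simp only [List.length_drop]
  rw [zero_add,
      show cp.length - kn + (cp.length - (cp.length - kn) - (kn - 1 - t))
          = cp.length - kn + t + 1 from by omega]
  ring

-- ===== VERDICT (by name: the statement is the Claim_ definition above) =====
theorem max_score_naive_spec : Claim_equal_max_score_naive := by
  intro cp k _ hpre
  have hlen : k ≤ (cp.length : Int) := hpre
  show max_score_naive cp k = max_score_naive_alt cp k
  rcases le_or_gt k 0 with hk | hk
  · exact equal_nonpos cp k hk
  · obtain ⟨kn, rfl⟩ : ∃ m : Nat, k = (m : Int) := ⟨k.toNat, by omega⟩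
    exact equal_pos cp kn (by omega)
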